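-- pv_equiv track=rewrite | github.com/Memact/Interface | core/chain_builder.py | _is_docs_session
-- ===== SOURCE A (Python) =====
-- _DOC_DOMAINS = {
--     "docs.python.org",
--     "developer.mozilla.org",
--     "readthedocs.io",
--     "learn.microsoft.com",
--     "stackoverflow.com",
-- }
--
-- def _session_app_sets(session: dict) -> tuple[set[str], set[str]]:
--     apps = {str(value).casefold() for value in session.get("applications") or [] if str(value).strip()}
--     domains = {str(value).casefold() for value in session.get("domains") or [] if str(value).strip()}
--     return apps, domains
--
-- def _is_docs_session(session: dict) -> bool:
--     _, domains = _session_app_sets(session)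
--     if domains & _DOC_DOMAINS:
--         return True
--     return any(
--         domain.startswith("docs.")
--         or "readthedocs" in domain
--         or "developer." in domain
--         or "learn." in domain
--         for domain in domains
--     )
-- ===== SOURCE B (Python) =====
-- _DOC_DOMAINS = {
--     "docs.python.org",
--     "developer.mozilla.org",
--     "readthedocs.io",
--     "learn.microsoft.com",
--     "stackoverflow.com",
-- }
--
-- def _is_docs_session(session: dict) -> bool:
--     # Single early-returning pass over the raw domain list; no set is built
--     # and no helper computing the (unused) applications set is called.
--     for value in session.get("domains") or []:
--         if not str(value).strip():
--             continue
--         d = str(value).casefold()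
--         if (d in _DOC_DOMAINS
--                 or d.startswith("docs.")
--                 or "readthedocs" in d
--                 or "developer." in d
--                 or "learn." in d):
--             return True
--     return False
-- ===== Notes on version B (the rewrite author's own statement) =====
-- stated objective: simpler
-- what changed: Replaces the two-phase approach (build a casefolded domain set via a helper, intersect it with _DOC_DOMAINS, then a second any-pass over the set) with one early-returning loop over the raw domain list that tests each cleaned value directly, so no intermediate sets and no helper call remain.
import Mathlib
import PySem

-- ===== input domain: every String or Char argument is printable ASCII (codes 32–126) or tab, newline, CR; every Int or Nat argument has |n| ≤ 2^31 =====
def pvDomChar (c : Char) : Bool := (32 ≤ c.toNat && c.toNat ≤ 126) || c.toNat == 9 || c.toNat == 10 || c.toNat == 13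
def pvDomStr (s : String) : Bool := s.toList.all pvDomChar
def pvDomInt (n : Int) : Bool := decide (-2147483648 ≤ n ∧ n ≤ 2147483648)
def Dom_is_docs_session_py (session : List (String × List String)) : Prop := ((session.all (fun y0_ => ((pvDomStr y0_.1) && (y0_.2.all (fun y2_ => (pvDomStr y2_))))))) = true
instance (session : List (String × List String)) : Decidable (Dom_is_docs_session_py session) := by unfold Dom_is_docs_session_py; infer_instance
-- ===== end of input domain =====

-- B replaces A's two-phase strategy (helper builds a casefolded domain set, intersect with
-- _DOC_DOMAINS, then a second any-pass) by one early-returning loop over the raw list (simpler).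
-- On the ASCII domain str.casefold coincides with lowercasing, ported as PySem.Str.lower.

-- ===== PORT A =====
def pvDocDomains : PySem.Set String :=
  PySem.Set.ofList ["docs.python.org", "developer.mozilla.org", "readthedocs.io",
                    "learn.microsoft.com", "stackoverflow.com"]

-- helper _session_app_sets (the `or []` only turns a missing/empty value into [], i.e. getD [])
def pvSessionAppSets (session : List (String × List String)) :
    PySem.Set String × PySem.Set String :=
  let apps := PySem.Set.ofList
    ((((PySem.Dict.get? (PySem.Dict.mk session) "applications").getD []).filter
        (fun value => !(PySem.Str.strip value == ""))).map PySem.Str.lower)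
  let domains := PySem.Set.ofList
    ((((PySem.Dict.get? (PySem.Dict.mk session) "domains").getD []).filter
        (fun value => !(PySem.Str.strip value == ""))).map PySem.Str.lower)
  (apps, domains)

def is_docs_session_py (session : List (String × List String)) : Bool :=
  let domains := (pvSessionAppSets session).2
  if !(PySem.Set.inter domains pvDocDomains).isEmpty then true
  else domains.any (fun domain =>
    PySem.Str.startswith domain "docs." || PySem.Str.isIn "readthedocs" domain ||
    PySem.Str.isIn "developer." domain || PySem.Str.isIn "learn." domain)

-- ===== PORT B =====
-- the parenthesised condition of B's `if`, on the casefolded domain d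
def pvP (d : String) : Bool :=
  PySem.Set.contains pvDocDomains d || PySem.Str.startswith d "docs." ||
  PySem.Str.isIn "readthedocs" d || PySem.Str.isIn "developer." d ||
  PySem.Str.isIn "learn." d

def pvAltLoop (l : List String) : Bool :=
  match l with
  | [] => false
  | value :: rest =>
    if PySem.Str.strip value == "" then pvAltLoop rest
    else if pvP (PySem.Str.lower value) then true
    else pvAltLoop rest

def is_docs_session_py_alt (session : List (String × List String)) : Bool :=
  pvAltLoop ((PySem.Dict.get? (PySem.Dict.mk session) "domains").getD [])

-- ===== PRECONDITION & SPEC =====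
def Spec_is_docs_session_py (session : List (String × List String)) (out : Bool) : Prop := out = is_docs_session_py_alt session
instance (session : List (String × List String)) (out : Bool) : Decidable (Spec_is_docs_session_py session out) := by unfold Spec_is_docs_session_py; infer_instance

-- ===== CLAIM (what is proved, stated in full; the proofs are below) =====
def Claim_equal_is_docs_session_py : Prop := ∀ (session : List (String × List String)), Dom_is_docs_session_py session → Spec_is_docs_session_py session (is_docs_session_py session)

-- ===== LEMMAS AND PROOFS =====

-- the cleaned (blank-dropped, casefolded) domain list both programs range over
def pvFilt (ds : List String) : List String :=
  (ds.filter (fun value => !(PySem.Str.strip value == ""))).map PySem.Str.lower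

theorem pvAltLoop_eq_any (l : List String) :
    pvAltLoop l = l.any (fun v => !(PySem.Str.strip v == "") && pvP (PySem.Str.lower v)) := by
  induction l with
  | nil => rfl
  | cons v rest ih =>
    simp only [pvAltLoop, List.any_cons]
    by_cases h1 : (PySem.Str.strip v == "") = true
    · rw [if_pos h1, ih, h1]
      simp
    · rw [if_neg h1]
      rw [Bool.not_eq_true] at h1
      rw [h1]
      by_cases h2 : pvP (PySem.Str.lower v) = true
      · rw [if_pos h2, h2]
        simp
      · rw [Bool.not_eq_true] at h2
        rw [if_neg (by simp [h2]), ih, h2]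
        simp

theorem pvMem_filt (ds : List String) (d : String) :
    d ∈ pvFilt ds ↔ ∃ v ∈ ds, (!(PySem.Str.strip v == "")) = true ∧ d = PySem.Str.lower v := by
  unfold pvFilt
  rw [List.mem_map]
  constructor
  · rintro ⟨v, hv, rfl⟩
    rw [List.mem_filter] at hv
    exact ⟨v, hv.1, hv.2, rfl⟩
  · rintro ⟨v, hv, hs, rfl⟩
    exact ⟨v, List.mem_filter.mpr ⟨hv, hs⟩, rfl⟩

-- B's condition pvP holds iff the domain is in _DOC_DOMAINS or matches A's any-pass pattern
theorem pvP_of_pat {d : String}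
    (h : (PySem.Str.startswith d "docs." || PySem.Str.isIn "readthedocs" d ||
          PySem.Str.isIn "developer." d || PySem.Str.isIn "learn." d) = true) :
    pvP d = true := by
  unfold pvP
  simp only [Bool.or_eq_true] at h ⊢
  rcases h with ((h | h) | h) | h
  · exact Or.inl (Or.inl (Or.inl (Or.inr h)))
  · exact Or.inl (Or.inl (Or.inr h))
  · exact Or.inl (Or.inr h)
  · exact Or.inr h

theorem pvP_cases {d : String} (h : pvP d = true) :
    PySem.Set.contains pvDocDomains d = true ∨
      (PySem.Str.startswith d "docs." || PySem.Str.isIn "readthedocs" d ||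
       PySem.Str.isIn "developer." d || PySem.Str.isIn "learn." d) = true := by
  unfold pvP at h
  simp only [Bool.or_eq_true] at h ⊢
  rcases h with ((((h | h) | h) | h) | h)
  · exact Or.inl h
  · exact Or.inr (Or.inl (Or.inl (Or.inl h)))
  · exact Or.inr (Or.inl (Or.inl (Or.inr h)))
  · exact Or.inr (Or.inl (Or.inr h))
  · exact Or.inr (Or.inr h)

theorem pvA_core (ds : List String) :
    (if !(PySem.Set.inter (PySem.Set.ofList (pvFilt ds)) pvDocDomains).isEmpty then true
     else (PySem.Set.ofList (pvFilt ds)).any (fun domain =>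
       PySem.Str.startswith domain "docs." || PySem.Str.isIn "readthedocs" domain ||
       PySem.Str.isIn "developer." domain || PySem.Str.isIn "learn." domain))
    = pvAltLoop ds := by
  rw [pvAltLoop_eq_any, Bool.eq_iff_iff, List.any_eq_true]
  constructor
  · intro h
    split_ifs at h with hne
    · -- the intersection is nonempty: some cleaned domain is in _DOC_DOMAINS
      rw [Bool.not_eq_eq_eq_not, Bool.not_true, List.isEmpty_eq_false_iff_exists_mem] at hne
      obtain ⟨d, hd⟩ := hne
      rw [PySem.Set.mem_inter, PySem.Set.mem_ofList, pvMem_filt] at hd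
      obtain ⟨⟨v, hv, hs, rfl⟩, hdoc⟩ := hd
      refine ⟨v, hv, ?_⟩
      rw [hs, Bool.true_and]
      unfold pvP
      rw [(PySem.Set.contains_iff _ _).mpr hdoc]
      simp
    · -- the any-pass found a pattern match
      rw [List.any_eq_true] at h
      obtain ⟨d, hd, hp⟩ := h
      rw [PySem.Set.mem_ofList, pvMem_filt] at hd
      obtain ⟨v, hv, hs, rfl⟩ := hd
      refine ⟨v, hv, ?_⟩
      rw [hs, Bool.true_and]
      exact pvP_of_pat hp
  · rintro ⟨v, hv, hp⟩
    rw [Bool.and_eq_true] at hp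
    obtain ⟨hstrip, hP⟩ := hp
    have hmem : PySem.Str.lower v ∈ PySem.Set.ofList (pvFilt ds) := by
      rw [PySem.Set.mem_ofList, pvMem_filt]
      exact ⟨v, hv, hstrip, rfl⟩
    by_cases hne : (!(PySem.Set.inter (PySem.Set.ofList (pvFilt ds)) pvDocDomains).isEmpty) = true
    · rw [if_pos hne]
    · rw [if_neg hne]
      rcases pvP_cases hP with hdoc | hpat
      · exfalso
        rw [Bool.not_eq_true, Bool.not_eq_eq_eq_not, Bool.not_false,
          List.isEmpty_iff, List.eq_nil_iff_forall_not_mem] at hne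
        exact hne (PySem.Str.lower v) ((PySem.Set.mem_inter _ _ _).mpr
          ⟨hmem, (PySem.Set.contains_iff _ _).mp hdoc⟩)
      · exact List.any_eq_true.mpr ⟨PySem.Str.lower v, hmem, hpat⟩

-- ===== VERDICT (by name: the statement is the Claim_ definition above) =====
theorem is_docs_session_py_spec : Claim_equal_is_docs_session_py := by
  intro session _
  unfold Spec_is_docs_session_py is_docs_session_py is_docs_session_py_alt pvSessionAppSets
  dsimp only
  exact pvA_core _
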